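-- pv_equiv track=rewrite | github.com/phuthai29062005/CVRP_neural | Local_search/local_search_utils.py | rebuild_solution
-- ===== SOURCE A (Python) =====
-- def rebuild_solution(routes):
--     """
--     routes: list[list[int]]
--     -> parent, route_markers
--     """
--     parent = []
--     route_markers = []
--
--     for r in routes:
--         for k, cust in enumerate(r):
--             parent.append(cust)
--             route_markers.append(1 if k == 0 else 0)
--
--     return parent, route_markers
-- ===== SOURCE B (Python) =====
-- def rebuild_solution(routes):
--     parent = [c for r in routes for c in r]
--     route_markers = [0] * len(parent)
--     pos = 0
--     for r in routes:
--         if r: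
--             route_markers[pos] = 1
--         pos += len(r)
--     return parent, route_markers
-- ===== Notes on version B (the rewrite author's own statement) =====
-- stated objective: alternative
-- what changed: Instead of emitting markers element by element alongside parent, B flattens routes once via a comprehension, allocates an all-zero marker array of that length in one step, and writes a 1 at each route's computed start offset.
import Mathlib
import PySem

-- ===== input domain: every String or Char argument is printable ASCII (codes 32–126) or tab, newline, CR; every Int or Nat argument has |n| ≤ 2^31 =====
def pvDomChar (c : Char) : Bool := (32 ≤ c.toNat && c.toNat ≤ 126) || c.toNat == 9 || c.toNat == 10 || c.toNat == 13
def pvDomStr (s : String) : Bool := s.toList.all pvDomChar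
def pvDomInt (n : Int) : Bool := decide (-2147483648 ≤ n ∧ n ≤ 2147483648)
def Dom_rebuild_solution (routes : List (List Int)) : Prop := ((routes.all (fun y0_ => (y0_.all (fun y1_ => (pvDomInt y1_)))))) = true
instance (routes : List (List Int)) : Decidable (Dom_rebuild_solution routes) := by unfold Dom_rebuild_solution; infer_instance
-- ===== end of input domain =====

-- B flattens routes once, pre-allocates an all-zero marker list, and writes 1s at computed route-start offsets, instead of A's per-element enumerate loop (objective: alternative).


-- ===== PORT A =====
-- literal port of A: per-element loop over enumerate(r), appending cust and (1 if k==0 else 0)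
def rebuild_solution (routes : List (List Int)) : List Int × List Int :=
  routes.foldl (fun acc r =>
    (PySem.List.enumerate r).foldl (fun acc2 kc =>
      (acc2.1 ++ [kc.2], acc2.2 ++ [if kc.1 == 0 then (1 : Int) else 0])) acc)
    ([], [])

-- ===== PORT B =====
-- port of B: flatten once; zero marker array of that length; write 1 at each route's start offset
-- (route_markers[pos] = 1 → List.set, exact since pos is always in range here)
def rebuild_solution_alt (routes : List (List Int)) : List Int × List Int :=
  let parent := routes.flatMap (fun r => r)
  let res := routes.foldl (fun (acc : List Int × Nat) r =>
    ((if r.isEmpty then acc.1 else acc.1.set acc.2 1), acc.2 + r.length))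
    (List.replicate parent.length (0 : Int), 0)
  (parent, res.1)

-- ===== PRECONDITION & SPEC =====
def Spec_rebuild_solution (routes : List (List Int)) (out : List Int × List Int) : Prop := out = rebuild_solution_alt routes
instance (routes : List (List Int)) (out : List Int × List Int) : Decidable (Spec_rebuild_solution routes out) := by unfold Spec_rebuild_solution; infer_instance

-- ===== CLAIM (what is proved, stated in full; the proofs are below) =====
def Claim_equal_rebuild_solution : Prop := ∀ (routes : List (List Int)), Dom_rebuild_solution routes → Spec_rebuild_solution routes (rebuild_solution routes)

-- ===== LEMMAS AND PROOFS =====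

-- canonical marker list: one segment per non-empty route
def segMarkers (routes : List (List Int)) : List Int :=
  routes.flatMap (fun r => if r.isEmpty then [] else 1 :: List.replicate (r.length - 1) 0)

-- A's inner loop starting at positive index appends the elements and all-zero markers
lemma innerA_pos (r : List Int) (n : Nat) (p m : List Int) :
    (PySem.List.enumerate r (n + 1 : Int)).foldl (fun acc2 kc =>
      (acc2.1 ++ [kc.2], acc2.2 ++ [if kc.1 == 0 then (1 : Int) else 0])) (p, m)
    = (p ++ r, m ++ List.replicate r.length 0) := by
  induction r generalizing n p m with
  | nil => simp [PySem.List.enumerate_nil]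
  | cons x xs ih =>
    rw [PySem.List.enumerate_cons]
    have h1 : ((n : Int) + 1 == 0) = false := by simp; omega
    simp only [List.foldl_cons, h1]
    have : ((n : Int) + 1 + 1) = ((n + 1 : Nat) : Int) + 1 := by push_cast; ring
    rw [this, ih]
    simp [List.replicate_succ]

-- A's inner loop = one marker segment
lemma innerA (r : List Int) (p m : List Int) :
    (PySem.List.enumerate r).foldl (fun acc2 kc =>
      (acc2.1 ++ [kc.2], acc2.2 ++ [if kc.1 == 0 then (1 : Int) else 0])) (p, m)
    = (p ++ r, m ++ (if r.isEmpty then [] else 1 :: List.replicate (r.length - 1) 0)) := by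
  cases r with
  | nil => simp [PySem.List.enumerate_nil]
  | cons x xs =>
    rw [PySem.List.enumerate_cons]
    have h0 : ((0 : Int) + 1) = ((0 : Nat) : Int) + 1 := by norm_num
    simp only [List.foldl_cons, show ((0:Int) == 0) = true from rfl, if_true, h0, innerA_pos]
    simp [List.append_assoc]

-- A's whole fold produces (flatten, segMarkers)
lemma foldA (routes : List (List Int)) (p m : List Int) :
    routes.foldl (fun acc r =>
      (PySem.List.enumerate r).foldl (fun acc2 kc =>
        (acc2.1 ++ [kc.2], acc2.2 ++ [if kc.1 == 0 then (1 : Int) else 0])) acc) (p, m)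
    = (p ++ routes.flatMap (fun r => r), m ++ segMarkers routes) := by
  induction routes generalizing p m with
  | nil => simp [segMarkers]
  | cons r rs ih =>
    simp only [List.foldl_cons, innerA, ih, segMarkers]
    cases r <;> simp [List.append_assoc]

-- B's marker loop invariant: setting 1s into a zero tail rebuilds the segments
lemma foldB (routes : List (List Int)) (m : List Int) :
    routes.foldl (fun (acc : List Int × Nat) r =>
      ((if r.isEmpty then acc.1 else acc.1.set acc.2 1), acc.2 + r.length))
      (m ++ List.replicate (routes.flatMap (fun r => r)).length (0 : Int), m.length)
    = (m ++ segMarkers routes, m.length + (routes.flatMap (fun r => r)).length) := by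
  induction routes generalizing m with
  | nil => simp [segMarkers]
  | cons r rs ih =>
    cases r with
    | nil =>
      simp only [List.foldl_cons, List.isEmpty_nil, if_true, List.length_nil, Nat.add_zero]
      have := ih m
      simp [segMarkers] at this ⊢
      exact this
    | cons x xs =>
      simp only [List.foldl_cons, List.isEmpty_cons, Bool.false_eq_true, if_false]
      have hlen : ((x :: xs) :: rs).flatMap (fun r => r) = (x :: xs) ++ rs.flatMap (fun r => r) := by
        simp
      rw [hlen]
      have hrep : List.replicate ((x :: xs) ++ rs.flatMap (fun r => r)).length (0 : Int)
          = 0 :: (List.replicate xs.length 0 ++ List.replicate (rs.flatMap (fun r => r)).length 0) := by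
        rw [List.length_append, List.length_cons,
          show xs.length + 1 + (rs.flatMap (fun r => r)).length
             = (xs.length + (rs.flatMap (fun r => r)).length) + 1 from by omega,
          List.replicate_succ, List.replicate_add]
      rw [hrep]
      have hset : (m ++ 0 :: (List.replicate xs.length 0 ++ List.replicate (rs.flatMap (fun r => r)).length (0:Int))).set m.length 1
          = (m ++ 1 :: List.replicate xs.length 0) ++ List.replicate (rs.flatMap (fun r => r)).length 0 := by
        rw [List.set_append_right _ _ (le_refl m.length)]
        simp [List.append_assoc]
      rw [hset]
      have hlen2 : m.length + (x :: xs).length = (m ++ 1 :: List.replicate xs.length (0:Int)).length := by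
        simp
      rw [hlen2, ih]
      simp [segMarkers, List.append_assoc, List.length_cons]
      omega

-- ===== VERDICT (by name: the statement is the Claim_ definition above) =====
theorem rebuild_solution_spec : Claim_equal_rebuild_solution := by
  intro routes _
  show rebuild_solution routes = rebuild_solution_alt routes
  have hA : rebuild_solution routes = (routes.flatMap (fun r => r), segMarkers routes) := by
    unfold rebuild_solution
    have := foldA routes [] []
    simpa using this
  have hB : rebuild_solution_alt routes = (routes.flatMap (fun r => r), segMarkers routes) := by
    show ((routes.flatMap (fun r => r)),
      (routes.foldl (fun (acc : List Int × Nat) r =>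
        ((if r.isEmpty then acc.1 else acc.1.set acc.2 1), acc.2 + r.length))
        (List.replicate (routes.flatMap (fun r => r)).length (0 : Int), 0)).1) = _
    have := foldB routes []
    simp only [List.nil_append, List.length_nil] at this
    rw [this]
  rw [hA, hB]
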